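-- pv_equiv track=rewrite | github.com/Ombhavsar218/redscan | rescanai/scan_controller.py | _get_os_detection_messages
-- ===== SOURCE A (Python) =====
-- from typing import Dict, List, Any, Optional, Callable
--
-- def _get_os_detection_messages(step_count: int) -> List[str]:
--     """Generate different OS detection messages"""
--     base_messages = [
--         "Starting operating system detection...",
--         "Analyzing TCP/IP stack fingerprints...",
--         "Checking TCP window sizes...",
--         "Analyzing ICMP responses...",
--         "Detecting packet fragmentation...",
--         "Checking TCP options...",
--         "Analyzing sequence numbers...",
--         "Detecting OS-specific behaviors...",
--         "Checking network stack implementation...",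
--         "Analyzing timing characteristics...",
--         "Detecting kernel versions...",
--         "Checking system uptime...",
--         "Analyzing network drivers...",
--         "Detecting virtualization...",
--         "Checking container platforms...",
--         "Analyzing system architecture...",
--         "Detecting patch levels...",
--         "Checking security features...",
--         "Analyzing system configuration...",
--         "Detecting installed software...",
--         "Checking system hardening...",
--         "Analyzing security policies...",
--         "Detecting compliance status...",
--         "Checking system vulnerabilities...",
--         "Finalizing OS detection..."
--     ]
--
--     messages = []
--     for i in range(step_count):
--         messages.append(base_messages[i % len(base_messages)])
--     return messages
-- ===== SOURCE B (Python) =====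
-- def _get_os_detection_messages(step_count: int) -> list:
--     """Generate different OS detection messages"""
--     base_messages = [
--         "Starting operating system detection...",
--         "Analyzing TCP/IP stack fingerprints...",
--         "Checking TCP window sizes...",
--         "Analyzing ICMP responses...",
--         "Detecting packet fragmentation...",
--         "Checking TCP options...",
--         "Analyzing sequence numbers...",
--         "Detecting OS-specific behaviors...",
--         "Checking network stack implementation...",
--         "Analyzing timing characteristics...",
--         "Detecting kernel versions...",
--         "Checking system uptime...",
--         "Analyzing network drivers...",
--         "Detecting virtualization...",
--         "Checking container platforms...",
--         "Analyzing system architecture...",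
--         "Detecting patch levels...",
--         "Checking security features...",
--         "Analyzing system configuration...",
--         "Detecting installed software...",
--         "Checking system hardening...",
--         "Analyzing security policies...",
--         "Detecting compliance status...",
--         "Checking system vulnerabilities...",
--         "Finalizing OS detection..."
--     ]
--     n = max(step_count, 0)
--     q, r = divmod(n, len(base_messages))
--     return base_messages * q + base_messages[:r]
-- ===== Notes on version B (the rewrite author's own statement) =====
-- stated objective: simpler
-- what changed: Replaces the element-by-element modulo-indexed loop with a single divmod: whole-list replication q times plus a slice of the first r messages (with a clamp to 0 for negative counts).
import Mathlib
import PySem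

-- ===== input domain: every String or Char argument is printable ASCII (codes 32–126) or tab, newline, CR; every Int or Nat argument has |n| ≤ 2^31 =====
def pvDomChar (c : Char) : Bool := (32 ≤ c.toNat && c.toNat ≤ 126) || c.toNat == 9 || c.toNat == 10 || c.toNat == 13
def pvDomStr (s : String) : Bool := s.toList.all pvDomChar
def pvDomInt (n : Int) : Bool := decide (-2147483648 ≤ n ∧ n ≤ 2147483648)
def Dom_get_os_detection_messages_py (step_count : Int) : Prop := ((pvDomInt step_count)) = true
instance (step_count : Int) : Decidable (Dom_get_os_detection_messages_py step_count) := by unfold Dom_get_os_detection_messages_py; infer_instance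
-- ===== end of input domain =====

-- B replaces A's element-by-element modulo-indexed loop with a single divmod:
-- list replication plus a prefix slice (objective: simpler).

-- the base_messages constant both Pythons define verbatim
def pvBaseMessages : List String := [
  "Starting operating system detection...",
  "Analyzing TCP/IP stack fingerprints...",
  "Checking TCP window sizes...",
  "Analyzing ICMP responses...",
  "Detecting packet fragmentation...",
  "Checking TCP options...",
  "Analyzing sequence numbers...",
  "Detecting OS-specific behaviors...",
  "Checking network stack implementation...",
  "Analyzing timing characteristics...",
  "Detecting kernel versions...",
  "Checking system uptime...",
  "Analyzing network drivers...",
  "Detecting virtualization...",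
  "Checking container platforms...",
  "Analyzing system architecture...",
  "Detecting patch levels...",
  "Checking security features...",
  "Analyzing system configuration...",
  "Detecting installed software...",
  "Checking system hardening...",
  "Analyzing security policies...",
  "Detecting compliance status...",
  "Checking system vulnerabilities...",
  "Finalizing OS detection..."
]

-- ===== PORT A =====
-- for i in range(step_count): messages.append(base_messages[i % len(base_messages)])
def get_os_detection_messages_py (step_count : Int) : List String :=
  (PySem.List.pyRange 0 step_count 1).foldl
    (fun messages i =>
      messages ++ [PySem.List.pyGetD pvBaseMessages (PySem.Int.mod i (pvBaseMessages.length : Int)) ""])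
    []

-- ===== PORT B =====
-- n = max(step_count, 0); q, r = divmod(n, len(base_messages)); base_messages * q + base_messages[:r]
def get_os_detection_messages_py_alt (step_count : Int) : List String :=
  let n := max step_count 0
  let q := PySem.Int.floordiv n (pvBaseMessages.length : Int)
  let r := PySem.Int.mod n (pvBaseMessages.length : Int)
  (List.replicate q.toNat pvBaseMessages).flatten ++ pvBaseMessages.take r.toNat

-- ===== PRECONDITION & SPEC =====
def Spec_get_os_detection_messages_py (step_count : Int) (out : List String) : Prop := out = get_os_detection_messages_py_alt step_count
instance (step_count : Int) (out : List String) : Decidable (Spec_get_os_detection_messages_py step_count out) := by unfold Spec_get_os_detection_messages_py; infer_instance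

-- ===== CLAIM (what is proved, stated in full; the proofs are below) =====
def Claim_equal_get_os_detection_messages_py : Prop := ∀ (step_count : Int), Dom_get_os_detection_messages_py step_count → Spec_get_os_detection_messages_py step_count (get_os_detection_messages_py step_count)

-- ===== LEMMAS AND PROOFS =====

theorem pvTake_succ_of_lt {α : Type} (l : List α) (n : ℕ) (d : α) (h : n < l.length) :
    l.take (n + 1) = l.take n ++ [l.getD n d] := by
  rw [List.take_add_one, List.getElem?_eq_getElem h, List.getD_eq_getElem?_getD,
    List.getElem?_eq_getElem h]
  rfl

-- the heart of the proof: the modulo-indexed prefix of length m equals q copies plus an r-prefix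
theorem pvRange_map_eq (m : ℕ) :
    (List.range m).map (fun k => pvBaseMessages.getD (k % 25) "") =
      (List.replicate (m / 25) pvBaseMessages).flatten ++ pvBaseMessages.take (m % 25) := by
  induction m with
  | zero => simp
  | succ m ih =>
    rw [List.range_succ, List.map_append, ih]
    by_cases h : m % 25 = 24
    · have h1 : (m + 1) / 25 = m / 25 + 1 := by omega
      have h2 : (m + 1) % 25 = 0 := by omega
      rw [h1, h2, List.replicate_succ', List.flatten_append]
      have : pvBaseMessages = pvBaseMessages.take 24 ++ [pvBaseMessages.getD 24 ""] := by decide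
      simp only [h, List.map_cons, List.map_nil, List.flatten_cons, List.flatten_nil,
        List.take_zero, List.append_nil, List.append_assoc]
      rw [← this]
    · have h1 : (m + 1) / 25 = m / 25 := by omega
      have h2 : (m + 1) % 25 = m % 25 + 1 := by omega
      rw [h1, h2, pvTake_succ_of_lt pvBaseMessages (m % 25) "" (by simp [pvBaseMessages]; omega)]
      simp

-- ===== VERDICT (by name: the statement is the Claim_ definition above) =====
theorem get_os_detection_messages_py_spec : Claim_equal_get_os_detection_messages_py := by
  intro s _
  unfold Spec_get_os_detection_messages_py get_os_detection_messages_py get_os_detection_messages_py_alt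
  rw [PySem.List.foldl_append_singleton_eq_map, List.nil_append]
  by_cases hs : s ≤ 0
  · rw [PySem.List.pyRange_one_eq_nil (by omega), max_eq_right hs]
    decide
  · have hs2 : 0 < s := by omega
    have hmax : max s 0 = s := max_eq_left hs2.le
    have hs' : s = (s.toNat : Int) := (Int.toNat_of_nonneg hs2.le).symm
    rw [hmax, hs', PySem.List.pyRange_zero_natCast, List.map_map]
    have hlen : (pvBaseMessages.length : Int) = ((25 : ℕ) : Int) := by decide
    rw [hlen]
    simp only [PySem.Int.floordiv_natCast, PySem.Int.mod_natCast, Int.toNat_natCast]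
    rw [← pvRange_map_eq]
    apply List.map_congr_left
    intro k _
    simp only [Function.comp_apply, PySem.Int.mod_natCast, PySem.List.pyGetD_natCast]
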